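-- pv_equiv track=rewrite | github.com/theinterneti/TTA.dev | packages/tta-dev-primitives/src/tta_dev_primitives/ace/benchmarks.py | _validate_criteria
-- ===== SOURCE A (Python) =====
-- from typing import Any
--
-- def _validate_criteria(code: str, criteria: dict[str, Any]) -> bool:
--     """Validate code against criteria."""
--     if not code:
--         return False
--
--     code_lower = code.lower()
--
--     for criterion, expected in criteria.items():
--         if criterion == "has_function" and expected:
--             if "def " not in code_lower:
--                 return False
--         elif criterion == "has_class" and expected:
--             if "class " not in code_lower:
--                 return False
--         elif criterion == "has_return" and expected:
--             if "return" not in code_lower: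
--                 return False
--         elif criterion == "has_loop" and expected:
--             if "for " not in code_lower and "while " not in code_lower:
--                 return False
--
--     return True
-- ===== SOURCE B (Python) =====
-- _FEATURES = [
--     ("has_function", ("def ",)),
--     ("has_class", ("class ",)),
--     ("has_return", ("return",)),
--     ("has_loop", ("for ", "while ")),
-- ]
--
--
-- def _validate_criteria(code: str, criteria: dict) -> bool:
--     """Validate code against criteria via a feature-set subset test."""
--     if not code:
--         return False
--     code_lower = code.lower()
--     present = {name for name, subs in _FEATURES
--                if any(s in code_lower for s in subs)}
--     known = {name for name, _ in _FEATURES}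
--     required = {k for k, v in criteria.items() if v} & known
--     return required <= present
-- ===== Notes on version B (the rewrite author's own statement) =====
-- stated objective: alternative
-- what changed: B replaces A's early-returning loop over criteria with branch-per-name substring checks by set algebra: it computes the set of features present in the code once, the set of required known criteria, and returns a subset test required <= present.
import Mathlib
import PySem

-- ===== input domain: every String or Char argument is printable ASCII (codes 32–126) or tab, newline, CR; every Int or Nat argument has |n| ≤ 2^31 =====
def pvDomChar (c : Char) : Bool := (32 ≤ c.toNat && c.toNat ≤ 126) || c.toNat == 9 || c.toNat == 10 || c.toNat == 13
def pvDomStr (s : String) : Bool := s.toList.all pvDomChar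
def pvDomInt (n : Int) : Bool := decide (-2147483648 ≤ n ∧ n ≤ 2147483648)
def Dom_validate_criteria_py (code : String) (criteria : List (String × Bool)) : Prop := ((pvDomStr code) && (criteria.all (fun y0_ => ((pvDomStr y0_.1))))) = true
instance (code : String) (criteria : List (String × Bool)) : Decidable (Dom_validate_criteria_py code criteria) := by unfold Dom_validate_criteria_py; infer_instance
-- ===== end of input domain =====

-- B replaces A's early-returning branch-per-name loop over criteria by set algebra:
-- the set of features present in the code, the set of required known criteria, and a
-- subset test (alternative decomposition; same behaviour, no Pre_ needed).

-- ===== PORT A =====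
-- the 'for criterion, expected in criteria.items(): …' loop with its early returns
def pvLoopA (cl : String) : List (String × Bool) → Bool
  | [] => true
  | (criterion, expected) :: rest =>
    if criterion == "has_function" && expected then
      if !(PySem.Str.isIn "def " cl) then false else pvLoopA cl rest
    else if criterion == "has_class" && expected then
      if !(PySem.Str.isIn "class " cl) then false else pvLoopA cl rest
    else if criterion == "has_return" && expected then
      if !(PySem.Str.isIn "return" cl) then false else pvLoopA cl rest
    else if criterion == "has_loop" && expected then
      if !(PySem.Str.isIn "for " cl) && !(PySem.Str.isIn "while " cl) then false
      else pvLoopA cl rest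
    else pvLoopA cl rest

def validate_criteria_py (code : String) (criteria : List (String × Bool)) : Bool :=
  if code == "" then false
  else pvLoopA (PySem.Str.lower code) criteria

-- ===== PORT B =====
-- the _FEATURES table of Source B
def pvFeatures : List (String × List String) :=
  [("has_function", ["def "]), ("has_class", ["class "]),
   ("has_return", ["return"]), ("has_loop", ["for ", "while "])]

def validate_criteria_py_alt (code : String) (criteria : List (String × Bool)) : Bool :=
  if code == "" then false
  else
    let code_lower := PySem.Str.lower code
    -- present = {name for name, subs in _FEATURES if any(s in code_lower for s in subs)}
    let present : PySem.Set String :=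
      PySem.Set.ofList ((pvFeatures.filter
        (fun p => p.2.any (fun s => PySem.Str.isIn s code_lower))).map Prod.fst)
    -- known = {name for name, _ in _FEATURES}
    let known : PySem.Set String := PySem.Set.ofList (pvFeatures.map Prod.fst)
    -- required = {k for k, v in criteria.items() if v} & known
    let required : PySem.Set String :=
      PySem.Set.inter (PySem.Set.ofList ((criteria.filter (fun p => p.2)).map Prod.fst)) known
    -- required <= present
    PySem.Set.issubset required present

-- ===== PRECONDITION & SPEC =====
def Spec_validate_criteria_py (code : String) (criteria : List (String × Bool)) (out : Bool) : Prop := out = validate_criteria_py_alt code criteria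
instance (code : String) (criteria : List (String × Bool)) (out : Bool) : Decidable (Spec_validate_criteria_py code criteria out) := by unfold Spec_validate_criteria_py; infer_instance

-- ===== CLAIM (what is proved, stated in full; the proofs are below) =====
def Claim_equal_validate_criteria_py : Prop := ∀ (code : String) (criteria : List (String × Bool)), Dom_validate_criteria_py code criteria → Spec_validate_criteria_py code criteria (validate_criteria_py code criteria)

-- ===== LEMMAS AND PROOFS =====

-- what A's branch chain demands of a single truthy criterion name
def pvOkA (cl k : String) : Bool :=
  if k == "has_function" then PySem.Str.isIn "def " cl
  else if k == "has_class" then PySem.Str.isIn "class " cl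
  else if k == "has_return" then PySem.Str.isIn "return" cl
  else if k == "has_loop" then (PySem.Str.isIn "for " cl || PySem.Str.isIn "while " cl)
  else true

lemma pvLoopA_eq_all (cl : String) (l : List (String × Bool)) :
    pvLoopA cl l = l.all (fun p => !p.2 || pvOkA cl p.1) := by
  induction l with
  | nil => rfl
  | cons p t ih =>
    obtain ⟨k, v⟩ := p
    cases v with
    | false => simp [pvLoopA, ih]
    | true =>
      by_cases h1 : k = "has_function"
      · subst h1; by_cases hd : PySem.Str.isIn "def " cl = true <;>
          simp [pvLoopA, pvOkA, ih]
      · by_cases h2 : k = "has_class"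
        · subst h2; by_cases hd : PySem.Str.isIn "class " cl = true <;>
            simp [pvLoopA, pvOkA, ih]
        · by_cases h3 : k = "has_return"
          · subst h3; by_cases hd : PySem.Str.isIn "return" cl = true <;>
              simp [pvLoopA, pvOkA, ih]
          · by_cases h4 : k = "has_loop"
            · subst h4;
              by_cases hf : PySem.Str.isIn "for " cl = true <;>
                by_cases hw : PySem.Str.isIn "while " cl = true <;>
                  simp [pvLoopA, pvOkA, ih]
            · simp [pvLoopA, pvOkA, h1, h2, h3, h4, ih]

-- membership in B's 'present' set agrees with pvOkA on the known names
lemma pvOkA_of_known (cl k : String)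
    (hk : k = "has_function" ∨ k = "has_class" ∨ k = "has_return" ∨ k = "has_loop") :
    (pvOkA cl k = true) ↔
      ∃ subs, (k, subs) ∈ pvFeatures ∧ subs.any (fun s => PySem.Str.isIn s cl) = true := by
  rcases hk with h | h | h | h <;> subst h <;>
    simp [pvOkA, pvFeatures]

lemma pvOkA_of_unknown (cl k : String)
    (hk : ¬ (k = "has_function" ∨ k = "has_class" ∨ k = "has_return" ∨ k = "has_loop")) :
    pvOkA cl k = true := by
  simp only [not_or] at hk
  obtain ⟨h1, h2, h3, h4⟩ := hk
  simp [pvOkA, h1, h2, h3, h4]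

-- B's subset test, characterised
lemma pvAlt_loop_eq (cl : String) (l : List (String × Bool)) :
    (PySem.Set.issubset
      (PySem.Set.inter (PySem.Set.ofList ((l.filter (fun p => p.2)).map Prod.fst))
        (PySem.Set.ofList (pvFeatures.map Prod.fst)))
      (PySem.Set.ofList ((pvFeatures.filter
        (fun p => p.2.any (fun s => PySem.Str.isIn s cl))).map Prod.fst)))
      = l.all (fun p => !p.2 || pvOkA cl p.1) := by
  rw [Bool.eq_iff_iff]
  rw [PySem.Set.issubset_iff]
  constructor
  · intro h
    rw [List.all_eq_true]
    rintro ⟨k, v⟩ hp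
    cases v with
    | false => simp
    | true =>
      simp only [Bool.not_true, Bool.false_or]
      by_cases hk : k = "has_function" ∨ k = "has_class" ∨ k = "has_return" ∨ k = "has_loop"
      · have hkmem : k ∈ PySem.Set.inter
            (PySem.Set.ofList ((l.filter (fun p => p.2)).map Prod.fst))
            (PySem.Set.ofList (pvFeatures.map Prod.fst)) := by
          rw [PySem.Set.mem_inter]
          constructor
          · rw [PySem.Set.mem_ofList]
            exact List.mem_map.mpr ⟨(k, true), List.mem_filter.mpr ⟨hp, rfl⟩, rfl⟩
          · rw [PySem.Set.mem_ofList]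
            rcases hk with h | h | h | h <;> subst h <;> simp [pvFeatures]
        have := h k hkmem
        rw [PySem.Set.mem_ofList] at this
        obtain ⟨q, hq, hq1⟩ := List.mem_map.mp this
        have hqf := List.mem_filter.mp hq
        exact (pvOkA_of_known cl k hk).mpr ⟨q.2, by rw [← hq1]; exact hqf.1, hqf.2⟩
      · exact pvOkA_of_unknown cl k hk
  · intro h k hkmem
    rw [PySem.Set.mem_inter, PySem.Set.mem_ofList, PySem.Set.mem_ofList] at hkmem
    obtain ⟨hreq, hknown⟩ := hkmem
    obtain ⟨⟨k', v⟩, hmem, hk1⟩ := List.mem_map.mp hreq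
    have hf := List.mem_filter.mp hmem
    have hv : v = true := by simpa using hf.2
    subst hv
    have hk' : k = k' := hk1.symm
    subst hk'
    have hkk : k = "has_function" ∨ k = "has_class" ∨ k = "has_return" ∨ k = "has_loop" := by
      simpa [pvFeatures] using hknown
    have hall := List.all_eq_true.mp h _ hf.1
    simp only [Bool.not_true, Bool.false_or] at hall
    obtain ⟨subs, hsubs, hany⟩ := (pvOkA_of_known cl k hkk).mp hall
    rw [PySem.Set.mem_ofList]
    exact List.mem_map.mpr ⟨(k, subs), List.mem_filter.mpr ⟨hsubs, hany⟩, rfl⟩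

-- ===== VERDICT (by name: the statement is the Claim_ definition above) =====
theorem validate_criteria_py_spec : Claim_equal_validate_criteria_py := by
  intro code criteria _hdom
  unfold Spec_validate_criteria_py validate_criteria_py validate_criteria_py_alt
  by_cases hc : code == ""
  · simp [hc]
  · simp only [Bool.not_eq_true] at hc
    simp only [hc]
    rw [pvLoopA_eq_all, pvAlt_loop_eq]
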